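-- pv_equiv track=rewrite | github.com/tmcg/AdventOfCode2017 | src/advent03.py | getSpiralResultExtra
-- ===== SOURCE A (Python) =====
-- def getSpiralResultExtra(n):
--   width, height = 20, 20
--   x, y = 10, 10
--   heading = 0  # 0,1,2,3 = right,up,left,down
--   grid = [[0 for xx in range(width)] for yy in range(height)]
--
--   sum_above = lambda g,x,y: g[y-1][x-1]+g[y-1][x]+g[y-1][x+1]
--   sum_below = lambda g,x,y: g[y+1][x-1]+g[y+1][x]+g[y+1][x+1]
--   sum_adjacent = lambda g,x,y: sum_above(g,x,y)+sum_below(g,x,y)+g[y][x-1]+g[y][x+1]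
--
--   grid[y][x] = 1
--   turn_left = lambda z: (z + 1) % 4
--
--   for i in range(0,100):
--     if heading == 0:
--       x += 1
--       ty,tx = y-1,x # check up
--     elif heading == 1:
--       y -= 1
--       ty,tx = y,x-1 # check left
--     elif heading == 2:
--       x -= 1
--       ty,tx = y+1,x # check down
--     else:
--       y += 1
--       ty,tx = y,x+1 # check right
--
--     grid_value = sum_adjacent(grid,x,y)
--     if grid_value > n:
--       return grid_value
--     grid[y][x] = grid_value
--     if grid[ty][tx] == 0:
--       heading = turn_left(heading)
--
--   return 0
-- ===== SOURCE B (Python) =====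
-- def getSpiralResultExtra(n):
--     # Run-length spiral: direction cycle right,up,left,down; run lengths 1,1,2,2,3,3,...
--     dirs = [(1, 0), (0, -1), (-1, 0), (0, 1)]
--     cells = {(0, 0): 1}
--     x = y = 0
--     d = 0
--     run = 1
--     steps_in_run = 0
--     runs_done = 0
--     for _ in range(100):
--         dx, dy = dirs[d]
--         x += dx
--         y += dy
--         s = sum(cells.get((x + i, y + j), 0)
--                 for i in (-1, 0, 1) for j in (-1, 0, 1) if (i, j) != (0, 0))
--         if s > n:
--             return s
--         cells[(x, y)] = s
--         steps_in_run += 1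
--         if steps_in_run == run:
--             steps_in_run = 0
--             d = (d + 1) % 4
--             runs_done += 1
--             if runs_done == 2:
--                 runs_done = 0
--                 run += 1
--     return 0
-- ===== Notes on version B (the rewrite author's own statement) =====
-- stated objective: alternative
-- what changed: B replaces A's preallocated 20x20 grid with heading updates driven by probing whether the neighbouring cell is still zero by a sparse dict of cells at (x,y) coordinates and the closed run-length direction schedule 1,1,2,2,3,3,... of the square spiral, summing the 8 neighbours by dict lookups.
import Mathlib
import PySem

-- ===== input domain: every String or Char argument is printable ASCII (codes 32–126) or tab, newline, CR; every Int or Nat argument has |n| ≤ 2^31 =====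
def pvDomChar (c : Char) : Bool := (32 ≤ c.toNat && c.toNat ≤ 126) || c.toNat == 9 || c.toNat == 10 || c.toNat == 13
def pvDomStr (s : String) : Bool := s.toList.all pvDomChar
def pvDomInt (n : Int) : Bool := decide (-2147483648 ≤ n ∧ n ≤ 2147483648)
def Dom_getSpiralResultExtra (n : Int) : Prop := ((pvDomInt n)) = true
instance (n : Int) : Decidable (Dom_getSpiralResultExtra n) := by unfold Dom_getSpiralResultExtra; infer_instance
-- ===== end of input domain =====

-- B replaces A's 20×20 mutable grid and neighbour-probe turning rule by a sparse dict of cells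
-- and the closed run-length schedule 1,1,2,2,3,3,… (objective: alternative decomposition).

-- ===== PORT A =====
-- g[y][x] on the 20×20 grid; every index reached by A lies in range, so the IndexError
-- branch (none) is never taken and the 0 default is unreachable.
def pvAGet (g : List (List Int)) (y x : Int) : Int :=
  (PySem.List.pyGet? ((PySem.List.pyGet? g y).getD []) x).getD 0

-- grid[y][x] = v; all assignments of A have 0 ≤ y,x < 20, where pySetD is exact.
def pvASet (g : List (List Int)) (y x : Int) (v : Int) : List (List Int) :=
  PySem.List.pySetD g y (PySem.List.pySetD ((PySem.List.pyGet? g y).getD []) x v)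

def pvASumAdjacent (g : List (List Int)) (x y : Int) : Int :=
  (pvAGet g (y-1) (x-1) + pvAGet g (y-1) x + pvAGet g (y-1) (x+1)) +
  (pvAGet g (y+1) (x-1) + pvAGet g (y+1) x + pvAGet g (y+1) (x+1)) +
  pvAGet g y (x-1) + pvAGet g y (x+1)

-- one iteration of A's for-loop: (grid_value, grid-after-store, x, y, heading-after-turn-check);
-- A stores/turn-checks only when it does not return early, but those computations are pure,
-- so hoisting them into the step function does not change the result.
def pvAStep (g : List (List Int)) (x y heading : Int) :
    Int × List (List Int) × Int × Int × Int :=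
  let st : Int × Int × Int × Int :=
    if heading == 0 then (x+1, y, y-1, x+1)
    else if heading == 1 then (x, y-1, y-1, x-1)
    else if heading == 2 then (x-1, y, y+1, x-1)
    else (x, y+1, y+1, x+1)
  let x' := st.1; let y' := st.2.1; let ty := st.2.2.1; let tx := st.2.2.2
  let gridValue := pvASumAdjacent g x' y'
  let g' := pvASet g y' x' gridValue
  let heading' := if pvAGet g' ty tx == 0 then PySem.Int.mod (heading + 1) 4 else heading
  (gridValue, g', x', y', heading')

-- the for-loop of A, one constructor per remaining iteration
def pvALoop (n : Int) (g : List (List Int)) (x y heading : Int) : Nat → Int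
  | 0 => 0
  | k+1 =>
    let r := pvAStep g x y heading
    if r.1 > n then r.1
    else pvALoop n r.2.1 r.2.2.1 r.2.2.2.1 r.2.2.2.2 k

def getSpiralResultExtra (n : Int) : Int :=
  let grid : List (List Int) := List.replicate 20 (List.replicate 20 (0 : Int))
  pvALoop n (pvASet grid 10 10 1) 10 10 0 100

-- ===== PORT B =====
def pvBOffsets : List (Int × Int) := [(-1,-1),(-1,0),(-1,1),(0,-1),(0,1),(1,-1),(1,0),(1,1)]

def pvBSum (cells : PySem.Dict (Int × Int) Int) (x y : Int) : Int :=
  pvBOffsets.foldl (fun acc ij => acc + cells.getD (x + ij.1, y + ij.2) 0) 0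

def pvBDirs : List (Int × Int) := [(1,0),(0,-1),(-1,0),(0,1)]

-- one movement step of B: (adjacent sum, cells-after-store, x, y)
def pvBStep (cells : PySem.Dict (Int × Int) Int) (x y d : Int) :
    Int × PySem.Dict (Int × Int) Int × Int × Int :=
  let dxy := (PySem.List.pyGet? pvBDirs d).getD (0, 0)
  let x' := x + dxy.1
  let y' := y + dxy.2
  let s := pvBSum cells x' y'
  (s, cells.insert (x', y') s, x', y')

def pvBLoop (n : Int) (cells : PySem.Dict (Int × Int) Int)
    (x y d run stepsInRun runsDone : Int) : Nat → Int
  | 0 => 0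
  | k+1 =>
    let r := pvBStep cells x y d
    let s := r.1
    if s > n then s
    else
      let cells' := r.2.1
      let x' := r.2.2.1
      let y' := r.2.2.2
      let sir := stepsInRun + 1
      if sir == run then
        let d' := PySem.Int.mod (d + 1) 4
        let rd := runsDone + 1
        if rd == 2 then pvBLoop n cells' x' y' d' (run + 1) 0 0 k
        else pvBLoop n cells' x' y' d' run 0 rd k
      else pvBLoop n cells' x' y' d run sir runsDone k

def getSpiralResultExtra_alt (n : Int) : Int :=
  pvBLoop n (PySem.Dict.empty.insert (0, 0) 1) 0 0 0 1 0 0 100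

-- ===== PRECONDITION & SPEC =====
def Spec_getSpiralResultExtra (n : Int) (out : Int) : Prop := out = getSpiralResultExtra_alt n
instance (n : Int) (out : Int) : Decidable (Spec_getSpiralResultExtra n out) := by unfold Spec_getSpiralResultExtra; infer_instance

-- ===== CLAIM (what is proved, stated in full; the proofs are below) =====
def Claim_equal_getSpiralResultExtra : Prop := ∀ (n : Int), Dom_getSpiralResultExtra n → Spec_getSpiralResultExtra n (getSpiralResultExtra n)

-- ===== LEMMAS AND PROOFS =====

-- first element of `sums` exceeding n, else 0: the common shape of both loops
def pvChain (n : Int) : List Int → Int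
  | [] => 0
  | s :: rest => if s > n then s else pvChain n rest

-- the sequence of adjacent sums A's loop produces, independent of n (no early return)
def pvASeq (g : List (List Int)) (x y heading : Int) : Nat → List Int
  | 0 => []
  | k+1 =>
    let r := pvAStep g x y heading
    r.1 :: pvASeq r.2.1 r.2.2.1 r.2.2.2.1 r.2.2.2.2 k

-- the sequence of sums B's loop produces, independent of n
def pvBSeq (cells : PySem.Dict (Int × Int) Int)
    (x y d run stepsInRun runsDone : Int) : Nat → List Int
  | 0 => []
  | k+1 =>
    let r := pvBStep cells x y d
    let s := r.1
    let cells' := r.2.1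
    let x' := r.2.2.1
    let y' := r.2.2.2
    let sir := stepsInRun + 1
    s :: (if sir == run then
        let d' := PySem.Int.mod (d + 1) 4
        let rd := runsDone + 1
        if rd == 2 then pvBSeq cells' x' y' d' (run + 1) 0 0 k
        else pvBSeq cells' x' y' d' run 0 rd k
      else pvBSeq cells' x' y' d run sir runsDone k)

theorem pvALoop_eq_chain (n : Int) (k : Nat) :
    ∀ (g : List (List Int)) (x y heading : Int),
      pvALoop n g x y heading k = pvChain n (pvASeq g x y heading k) := by
  induction k with
  | zero => intro g x y heading; rfl
  | succ k ih =>
    intro g x y heading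
    simp only [pvALoop, pvASeq, pvChain]
    repeat' split
    all_goals first | rfl | exact ih _ _ _ _

theorem pvBLoop_eq_chain (n : Int) (k : Nat) :
    ∀ (cells : PySem.Dict (Int × Int) Int) (x y d run stepsInRun runsDone : Int),
      pvBLoop n cells x y d run stepsInRun runsDone k =
        pvChain n (pvBSeq cells x y d run stepsInRun runsDone k) := by
  induction k with
  | zero => intro cells x y d run sir rd; rfl
  | succ k ih =>
    intro cells x y d run sir rd
    simp only [pvBLoop, pvBSeq, pvChain]
    repeat' split
    all_goals first | rfl | exact ih _ _ _ _ _ _ _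

-- the two concrete 100-element sum sequences coincide (closed computation)
set_option maxRecDepth 100000 in
set_option maxHeartbeats 2000000 in
theorem pvSeq_eq :
    pvASeq (pvASet (List.replicate 20 (List.replicate 20 (0 : Int))) 10 10 1) 10 10 0 100 =
    pvBSeq (PySem.Dict.empty.insert (0, 0) 1) 0 0 0 1 0 0 100 := by
  decide

-- ===== VERDICT (by name: the statement is the Claim_ definition above) =====
theorem getSpiralResultExtra_spec : Claim_equal_getSpiralResultExtra := by
  intro n _
  show getSpiralResultExtra n = getSpiralResultExtra_alt n
  unfold getSpiralResultExtra getSpiralResultExtra_alt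
  rw [pvALoop_eq_chain, pvBLoop_eq_chain, pvSeq_eq]
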